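-- pv_equiv track=rewrite | github.com/Roxana-Dobrica/Laborator-Python | Laborator 2/Tema2.py | spectator_seats
-- ===== SOURCE A (Python) =====
-- def spectator_seats(matrix):
--     spectators = []
--
--     for row in range(len(matrix)):
--         for column in range(len(matrix[0])):
--             for row_front in range(row):
--                 if matrix[row][column] < matrix[row_front][column]:
--                     spectators.append((row, column))
--                     break
--     return spectators
-- ===== SOURCE B (Python) =====
-- def spectator_seats(matrix):
--     spectators = []
--     if not matrix:
--         return spectators
--     width = len(matrix[0])
--     maxima = list(matrix[0])
--     for row in range(1, len(matrix)):
--         for column in range(width):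
--             value = matrix[row][column]
--             if value < maxima[column]:
--                 spectators.append((row, column))
--             elif value > maxima[column]:
--                 maxima[column] = value
--     return spectators
-- ===== Notes on version B (the rewrite author's own statement) =====
-- stated objective: faster
-- what changed: Replaces the inner rescan of all earlier rows by a per-column running maximum updated in one pass over the rows.
import Mathlib
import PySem

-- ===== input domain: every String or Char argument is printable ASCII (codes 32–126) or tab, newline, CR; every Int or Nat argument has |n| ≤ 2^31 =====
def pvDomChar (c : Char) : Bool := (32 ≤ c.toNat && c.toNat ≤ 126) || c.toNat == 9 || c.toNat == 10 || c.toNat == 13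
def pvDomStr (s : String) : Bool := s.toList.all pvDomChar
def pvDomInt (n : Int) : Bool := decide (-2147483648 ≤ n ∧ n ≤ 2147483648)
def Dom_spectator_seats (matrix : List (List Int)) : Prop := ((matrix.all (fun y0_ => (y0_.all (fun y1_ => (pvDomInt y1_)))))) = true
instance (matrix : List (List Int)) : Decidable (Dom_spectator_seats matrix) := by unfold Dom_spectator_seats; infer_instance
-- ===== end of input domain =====

-- B replaces A's rescan of all earlier rows by a per-column running maximum (one pass over the rows).

-- ===== PORT A =====
-- triple nested loop; the inner 'for row_front in range(row): … break' appends (row, column) once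
-- iff some earlier row holds a larger value in the same column, which is the `any` below.
def spectator_seats (matrix : List (List Int)) : List (Int × Int) :=
  (PySem.List.pyRange 0 matrix.length 1).foldl (fun acc row =>
    (PySem.List.pyRange 0 (PySem.List.pyGetD matrix 0 []).length 1).foldl (fun acc2 col =>
      if (PySem.List.pyRange 0 row 1).any (fun rf =>
            PySem.List.pyGetD (PySem.List.pyGetD matrix row []) col 0 <
            PySem.List.pyGetD (PySem.List.pyGetD matrix rf []) col 0)
      then acc2 ++ [(row, col)] else acc2) acc) []

-- ===== PORT B =====
def spectator_seats_alt (matrix : List (List Int)) : List (Int × Int) :=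
  match matrix with
  | [] => []
  | first :: _ =>
    (((PySem.List.pyRange 1 matrix.length 1).foldl (fun st row =>
        (PySem.List.pyRange 0 (first.length : Int) 1).foldl (fun st2 col =>
          let value := PySem.List.pyGetD (PySem.List.pyGetD matrix row []) col 0
          if value < PySem.List.pyGetD st2.1 col 0 then (st2.1, st2.2 ++ [(row, col)])
          else if PySem.List.pyGetD st2.1 col 0 < value then (PySem.List.pySetD st2.1 col value, st2.2)
          else st2) st)
      ((first, []) : List Int × List (Int × Int))).2)

-- ===== PRECONDITION & SPEC =====
-- Pre_ excludes exactly the inputs on which Python A raises IndexError: a matrix with at least two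
-- rows in which some row is shorter than row 0. With at most one row nothing is ever indexed.
def Pre_spectator_seats (matrix : List (List Int)) : Prop :=
  matrix.length ≤ 1 ∨ ∀ r ∈ matrix, (matrix.headD []).length ≤ r.length
instance (matrix : List (List Int)) : Decidable (Pre_spectator_seats matrix) := by unfold Pre_spectator_seats; infer_instance
def pvWitness_spectator_seats : List (List Int) := [[1, 5], [3, 2], [2, 7]]
def Spec_spectator_seats (matrix : List (List Int)) (out : List (Int × Int)) : Prop := out = spectator_seats_alt matrix
instance (matrix : List (List Int)) (out : List (Int × Int)) : Decidable (Spec_spectator_seats matrix out) := by unfold Spec_spectator_seats; infer_instance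

-- ===== CLAIM (what is proved, stated in full; the proofs are below) =====
def Claim_equal_spectator_seats : Prop := ∀ (matrix : List (List Int)), Dom_spectator_seats matrix → Pre_spectator_seats matrix → Spec_spectator_seats matrix (spectator_seats matrix)

-- ===== LEMMAS AND PROOFS =====

-- seat value at row i, column c (out-of-range reads default to 0; never reached inside Pre_)
def pvG (matrix : List (List Int)) (i c : Nat) : Int := (matrix.getD i []).getD c 0

-- column maximum over rows 0..r
def pvM (matrix : List (List Int)) : Nat → Nat → Int
  | 0, c => pvG matrix 0 c
  | r+1, c => max (pvM matrix r c) (pvG matrix (r+1) c)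

-- seats contributed by row k+1
def pvRow (matrix : List (List Int)) (w k : Nat) : List (Int × Int) :=
  ((List.range w).filter (fun c => decide (pvG matrix (k+1) c < pvM matrix k c))).map
    (fun (c : Nat) => (((k+1 : Nat) : Int), (c : Int)))

-- 'some earlier row is larger' is 'smaller than the column maximum of rows 0..k'
lemma pvAny_eq (matrix : List (List Int)) (v : Int) (k c : Nat) :
    ((List.range (k+1)).any (fun i => decide (v < pvG matrix i c)))
      = decide (v < pvM matrix k c) := by
  induction k with
  | zero => simp [pvM]
  | succ k ih =>
      rw [List.range_succ, List.any_append, ih]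
      simp [pvM]

-- A's nested loops as a flatMap of per-row filtered column lists
lemma A_norm (matrix : List (List Int)) :
    spectator_seats matrix =
      (List.range matrix.length).flatMap (fun r =>
        ((List.range (matrix.getD 0 []).length).filter (fun c =>
            (List.range r).any (fun i => decide (pvG matrix r c < pvG matrix i c)))).map
          (fun (c : Nat) => ((r : Int), (c : Int)))) := by
  unfold spectator_seats
  simp only [PySem.List.pyGetD_zero, PySem.List.pyRange_zero_nat, List.foldl_map,
    PySem.List.pyGetD_natCast, List.any_map, Function.comp_def, pvG]
  have hbody : ∀ (acc : List (Int × Int)) (r : Nat),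
      (List.range (matrix.getD 0 []).length).foldl (fun acc2 (c : Nat) =>
        if (List.range r).any (fun i =>
              decide ((matrix.getD r []).getD c 0 < (matrix.getD i []).getD c 0))
        then acc2 ++ [((r : Int), (c : Int))] else acc2) acc
      = acc ++ ((List.range (matrix.getD 0 []).length).filter (fun c =>
          (List.range r).any (fun i =>
            decide ((matrix.getD r []).getD c 0 < (matrix.getD i []).getD c 0)))).map
        (fun (c : Nat) => ((r : Int), (c : Int))) := by
    intro acc r
    exact PySem.List.foldl_append_if _ _ _ _
  rw [PySem.List.foldl_congr_mem _ _ _ _ (fun acc x _ => hbody acc x),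
    PySem.List.foldl_append_eq_flatMap]
  simp

-- one pass of B's inner column loop, characterised pointwise
lemma inner_loop (v : Nat → Int) (ri : Int) (m : List Int) (s : List (Int × Int)) (k : Nat)
    (hk : k ≤ m.length) :
    ∃ M : List Int,
      (List.range k).foldl (fun st2 (c : Nat) =>
          if v c < st2.1.getD c 0 then (st2.1, st2.2 ++ [(ri, (c : Int))])
          else if st2.1.getD c 0 < v c then (st2.1.set c (v c), st2.2)
          else st2) (m, s)
        = (M, s ++ ((List.range k).filter (fun c => decide (v c < m.getD c 0))).map
            (fun (c : Nat) => (ri, (c : Int))))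
      ∧ M.length = m.length
      ∧ (∀ c, M.getD c 0 = if c < k then max (m.getD c 0) (v c) else m.getD c 0) := by
  induction k with
  | zero => exact ⟨m, by simp⟩
  | succ k ih =>
      obtain ⟨M, hfold, hlen, hpt⟩ := ih (Nat.le_of_succ_le hk)
      rw [List.range_succ, List.foldl_append, hfold, List.filter_append, List.map_append,
        List.foldl_cons, List.foldl_nil]
      simp only [List.getD_eq_getElem?_getD] at hpt ⊢
      have hMk : M[k]?.getD 0 = m[k]?.getD 0 := by
        rw [hpt k, if_neg (Nat.lt_irrefl k)]
      by_cases h1 : v k < m[k]?.getD 0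
      · refine ⟨M, ?_, hlen, ?_⟩
        · rw [if_pos (hMk ▸ h1 : v k < M[k]?.getD 0)]
          simp [h1]
        · intro c
          rw [hpt c]
          by_cases hc : c < k
          · rw [if_pos hc, if_pos (Nat.lt_succ_of_lt hc)]
          · by_cases hck : c = k
            · subst hck
              rw [if_neg hc, if_pos (Nat.lt_succ_self c)]
              exact (max_eq_left (le_of_lt h1)).symm
            · have h3 : ¬ c < k + 1 := by omega
              rw [if_neg hc, if_neg h3]
      · by_cases h2 : m[k]?.getD 0 < v k
        · refine ⟨M.set k (v k), ?_, by simp [hlen], ?_⟩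
          · rw [if_neg (hMk ▸ h1 : ¬ v k < M[k]?.getD 0), if_pos (hMk ▸ h2 : M[k]?.getD 0 < v k)]
            simp [h1]
          · intro c
            by_cases hck : c = k
            · subst hck
              have hcl : c < M.length := by omega
              rw [List.getElem?_set_self (by omega), if_pos (Nat.lt_succ_self c),
                max_eq_right (le_of_lt h2)]
              rfl
            · rw [List.getElem?_set_ne (Ne.symm hck), hpt c]
              by_cases hc : c < k
              · rw [if_pos hc, if_pos (Nat.lt_succ_of_lt hc)]
              · have h3 : ¬ c < k + 1 := by omega
                rw [if_neg hc, if_neg h3]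
        · have heq : v k = m[k]?.getD 0 := le_antisymm (not_lt.mp h2) (not_lt.mp h1)
          refine ⟨M, ?_, hlen, ?_⟩
          · rw [if_neg (hMk ▸ h1 : ¬ v k < M[k]?.getD 0), if_neg (hMk ▸ h2 : ¬ M[k]?.getD 0 < v k)]
            simp [h1]
          · intro c
            rw [hpt c]
            by_cases hc : c < k
            · rw [if_pos hc, if_pos (Nat.lt_succ_of_lt hc)]
            · by_cases hck : c = k
              · subst hck
                rw [if_neg hc, if_pos (Nat.lt_succ_self c), heq, max_self]
              · have h3 : ¬ c < k + 1 := by omega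
                rw [if_neg hc, if_neg h3]

-- B's outer row loop: the maxima list tracks pvM, the output accumulates pvRow
lemma outer_loop (first : List Int) (rest : List (List Int)) (j : Nat) :
    ∃ M : List Int,
      (List.range j).foldl (fun st (k : Nat) =>
          (List.range first.length).foldl (fun st2 (c : Nat) =>
            if ((first :: rest).getD (k+1) []).getD c 0 < st2.1.getD c 0 then
              (st2.1, st2.2 ++ [(((k+1 : Nat) : Int), (c : Int))])
            else if st2.1.getD c 0 < ((first :: rest).getD (k+1) []).getD c 0 then
              (st2.1.set c (((first :: rest).getD (k+1) []).getD c 0), st2.2)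
            else st2) st) ((first, []) : List Int × List (Int × Int))
        = (M, (List.range j).flatMap (fun k => pvRow (first :: rest) first.length k))
      ∧ M.length = first.length
      ∧ (∀ c, M.getD c 0 = if c < first.length then pvM (first :: rest) j c else first.getD c 0) := by
  induction j with
  | zero =>
      refine ⟨first, by simp, rfl, ?_⟩
      intro c
      split_ifs with h
      · simp [pvM, pvG]
      · rfl
  | succ j ih =>
      obtain ⟨M, hfold, hlen, hpt⟩ := ih
      obtain ⟨M', hfold', hlen', hpt'⟩ := inner_loop
        (fun c => ((first :: rest).getD (j+1) []).getD c 0) ((j+1 : Nat) : Int) M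
        ((List.range j).flatMap (fun k => pvRow (first :: rest) first.length k))
        first.length (le_of_eq hlen.symm)
      rw [List.range_succ, List.foldl_append, hfold, List.foldl_cons, List.foldl_nil, hfold']
      refine ⟨M', ?_, by rw [hlen', hlen], ?_⟩
      · rw [List.flatMap_append]
        congr 1
        simp only [List.flatMap_cons, List.flatMap_nil, List.append_nil, pvRow]
        have hfc : List.filter
            (fun c => decide (((first :: rest).getD (j + 1) []).getD c 0 < M.getD c 0))
            (List.range first.length)
            = List.filter (fun c => decide (pvG (first :: rest) (j+1) c < pvM (first :: rest) j c))
              (List.range first.length) := by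
          apply List.filter_congr
          intro c hc
          rw [List.mem_range] at hc
          rw [hpt c, if_pos hc, pvG]
        rw [hfc]
      · intro c
        rw [hpt' c]
        by_cases hc : c < first.length
        · rw [if_pos hc, if_pos hc, hpt c, if_pos hc]
          rfl
        · rw [if_neg hc, if_neg hc, hpt c, if_neg hc]

lemma pyRange_one_from_one (n : Nat) :
    PySem.List.pyRange 1 (n : Int) 1 = (List.range (n-1)).map (fun (k : Nat) => ((k+1 : Nat) : Int)) := by
  rw [PySem.List.pyRange_one]
  have h : ((n : Int) - 1).toNat = n - 1 := by omega
  rw [h]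
  apply List.map_congr_left
  intro k _
  push_cast
  ring

lemma B_norm (first : List Int) (rest : List (List Int)) :
    spectator_seats_alt (first :: rest) =
      (List.range rest.length).flatMap (fun k => pvRow (first :: rest) first.length k) := by
  obtain ⟨M, hfold, hlen, hpt⟩ := outer_loop first rest rest.length
  unfold spectator_seats_alt
  simp only [List.length_cons, pyRange_one_from_one, PySem.List.pyRange_zero_nat,
    List.foldl_map, PySem.List.pyGetD_natCast, PySem.List.pySetD_natCast,
    Nat.add_sub_cancel]
  rw [hfold]

lemma A_final (first : List Int) (rest : List (List Int)) :
    spectator_seats (first :: rest) =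
      (List.range rest.length).flatMap (fun k => pvRow (first :: rest) first.length k) := by
  rw [A_norm]
  simp only [List.length_cons, List.getD_cons_zero]
  have hsplit : ∀ f : Nat → List (Int × Int),
      (List.range (rest.length + 1)).flatMap f
        = f 0 ++ (List.range rest.length).flatMap (fun k => f (k+1)) := by
    intro f
    rw [List.range_succ_eq_map, List.flatMap_cons, List.flatMap_map]
  rw [hsplit]
  have h0 : ((List.range first.length).filter (fun c =>
      (List.range 0).any (fun i =>
        decide (pvG (first :: rest) 0 c < pvG (first :: rest) i c)))).map
      (fun (c : Nat) => (((0 : Nat) : Int), (c : Int))) = [] := by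
    simp
  rw [h0, List.nil_append]
  have hfun : (fun (k : Nat) =>
      ((List.range first.length).filter (fun c =>
        (List.range (k+1)).any (fun i =>
          decide (pvG (first :: rest) (k+1) c < pvG (first :: rest) i c)))).map
        (fun (c : Nat) => (((k+1 : Nat) : Int), (c : Int))))
      = fun k => pvRow (first :: rest) first.length k := by
    funext k
    unfold pvRow
    congr 1
    apply List.filter_congr
    intro c _
    exact pvAny_eq (first :: rest) (pvG (first :: rest) (k+1) c) k c
  rw [hfun]

-- ===== VERDICT (by name: the statement is the Claim_ definition above) =====
theorem spectator_seats_spec : Claim_equal_spectator_seats := by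
  intro matrix _ _
  unfold Spec_spectator_seats
  cases matrix with
  | nil => rfl
  | cons first rest => rw [A_final, B_norm]
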